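-- pv_equiv track=rewrite | github.com/Data-Jamming/Music-Genre-Predictor | multiSVM.py | genre_count
-- ===== SOURCE A (Python) =====
-- def genre_count(y_test):
-- 	counts = {"Rock": 0, "Country": 0, "Electronic": 0, "Folk": 0, "Hip-Hop": 0, "Indie": 0, "Jazz": 0, "Metal": 0, "Pop": 0, "R&B": 0}
--
-- 	for i in range(len(y_test)):
-- 		if y_test[i] == 1:
-- 			counts["Rock"] += 1
-- 		elif y_test[i] == 2:
-- 			counts["Country"] += 1
-- 		elif y_test[i] == 3:
-- 			counts["Electronic"] += 1
-- 		elif y_test[i] == 4: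
-- 			counts["Folk"] += 1
-- 		elif y_test[i] == 5:
-- 			counts["Hip-Hop"] += 1
-- 		elif y_test[i] == 6:
-- 			counts["Indie"] += 1
-- 		elif y_test[i] == 7:
-- 			counts["Jazz"] += 1
-- 		elif y_test[i] == 8:
-- 			counts["Metal"] += 1
-- 		elif y_test[i] == 9:
-- 			counts["Pop"] += 1
-- 		elif y_test[i] == 10:
-- 			counts["R&B"] += 1
--
-- 	return counts
-- ===== SOURCE B (Python) =====
-- def genre_count(y_test):
--     names = ["Rock", "Country", "Electronic", "Folk", "Hip-Hop", "Indie",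
--              "Jazz", "Metal", "Pop", "R&B"]
--     return {name: y_test.count(code) for code, name in enumerate(names, start=1)}
-- ===== Notes on version B (the rewrite author's own statement) =====
-- stated objective: alternative
-- what changed: Instead of one pass over the data with a ten-way if/elif tally into a pre-initialised dict, B keeps no running counts at all: it loops over the ten ordered genre names and computes each slot with a separate full scan list.count(code), assembling the dict in that fixed order.
import Mathlib
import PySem

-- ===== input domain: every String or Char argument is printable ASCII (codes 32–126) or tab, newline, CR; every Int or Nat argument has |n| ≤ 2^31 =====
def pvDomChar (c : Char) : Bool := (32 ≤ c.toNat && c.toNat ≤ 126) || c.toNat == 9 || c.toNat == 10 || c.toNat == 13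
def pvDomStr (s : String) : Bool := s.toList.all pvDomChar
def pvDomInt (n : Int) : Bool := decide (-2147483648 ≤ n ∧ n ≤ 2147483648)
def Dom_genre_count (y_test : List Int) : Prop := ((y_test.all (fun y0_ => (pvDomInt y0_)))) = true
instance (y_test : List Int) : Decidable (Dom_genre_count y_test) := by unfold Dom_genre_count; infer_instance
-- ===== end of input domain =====

-- B replaces A's single-pass ten-way if/elif tally by ten independent per-genre scans
-- (list.count per code, written into the dict in the fixed Rock..R&B order);
-- objective: alternative decomposition, same cost.

-- ===== PORT A =====
-- the body of A's for-loop: the ten-way if/elif chain on y_test[i]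
def genreStepA (counts : PySem.Dict String Int) (v : Int) : PySem.Dict String Int :=
  if v = 1 then counts.modify "Rock" 0 (· + 1)
  else if v = 2 then counts.modify "Country" 0 (· + 1)
  else if v = 3 then counts.modify "Electronic" 0 (· + 1)
  else if v = 4 then counts.modify "Folk" 0 (· + 1)
  else if v = 5 then counts.modify "Hip-Hop" 0 (· + 1)
  else if v = 6 then counts.modify "Indie" 0 (· + 1)
  else if v = 7 then counts.modify "Jazz" 0 (· + 1)
  else if v = 8 then counts.modify "Metal" 0 (· + 1)
  else if v = 9 then counts.modify "Pop" 0 (· + 1)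
  else if v = 10 then counts.modify "R&B" 0 (· + 1)
  else counts

def genre_count (y_test : List Int) : List (String × Int) :=
  let init : PySem.Dict String Int := PySem.Dict.ofList
    [("Rock", 0), ("Country", 0), ("Electronic", 0), ("Folk", 0), ("Hip-Hop", 0),
     ("Indie", 0), ("Jazz", 0), ("Metal", 0), ("Pop", 0), ("R&B", 0)]
  let counts := (PySem.List.pyRange 0 (PySem.List.len y_test) 1).foldl
    (fun counts i => genreStepA counts (PySem.List.pyGetD y_test i 0)) init
  counts.items

-- ===== PORT B =====
def genreNames : List String :=
  ["Rock", "Country", "Electronic", "Folk", "Hip-Hop", "Indie", "Jazz", "Metal", "Pop", "R&B"]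

def genre_count_alt (y_test : List Int) : List (String × Int) :=
  -- dict comprehension over enumerate(names, start=1); each value is a full scan y_test.count(code)
  ((PySem.List.enumerate genreNames 1).foldl
    (fun d p => d.insert p.2 (PySem.List.count y_test p.1)) PySem.Dict.empty).items

-- ===== PRECONDITION & SPEC =====
def Spec_genre_count (y_test : List Int) (out : List (String × Int)) : Prop := out = genre_count_alt y_test
instance (y_test : List Int) (out : List (String × Int)) : Decidable (Spec_genre_count y_test out) := by unfold Spec_genre_count; infer_instance

-- ===== CLAIM (what is proved, stated in full; the proofs are below) =====
def Claim_equal_genre_count : Prop := ∀ (y_test : List Int), Dom_genre_count y_test → Spec_genre_count y_test (genre_count y_test)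

-- ===== LEMMAS AND PROOFS =====

-- A's loop state in closed form: folding genreStepA over xs adds each code's count to its slot.
lemma genre_foldA (xs : List Int) (a b c d e f g h i j : Int) :
    xs.foldl genreStepA (PySem.Dict.mk
      [("Rock", a), ("Country", b), ("Electronic", c), ("Folk", d), ("Hip-Hop", e),
       ("Indie", f), ("Jazz", g), ("Metal", h), ("Pop", i), ("R&B", j)]) =
    PySem.Dict.mk
      [("Rock", a + xs.count 1), ("Country", b + xs.count 2), ("Electronic", c + xs.count 3),
       ("Folk", d + xs.count 4), ("Hip-Hop", e + xs.count 5), ("Indie", f + xs.count 6),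
       ("Jazz", g + xs.count 7), ("Metal", h + xs.count 8), ("Pop", i + xs.count 9),
       ("R&B", j + xs.count 10)] := by
  induction xs generalizing a b c d e f g h i j with
  | nil => simp
  | cons x xs ih =>
    rw [List.foldl_cons]
    have step : ∀ (v : Int), (genreStepA (PySem.Dict.mk
        [("Rock", a), ("Country", b), ("Electronic", c), ("Folk", d), ("Hip-Hop", e),
         ("Indie", f), ("Jazz", g), ("Metal", h), ("Pop", i), ("R&B", j)]) v) =
      PySem.Dict.mk
        [("Rock", a + if v = 1 then 1 else 0), ("Country", b + if v = 2 then 1 else 0),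
         ("Electronic", c + if v = 3 then 1 else 0), ("Folk", d + if v = 4 then 1 else 0),
         ("Hip-Hop", e + if v = 5 then 1 else 0), ("Indie", f + if v = 6 then 1 else 0),
         ("Jazz", g + if v = 7 then 1 else 0), ("Metal", h + if v = 8 then 1 else 0),
         ("Pop", i + if v = 9 then 1 else 0), ("R&B", j + if v = 10 then 1 else 0)] := by
      intro v
      by_cases h1 : v = 1
      · subst h1; simp [genreStepA, PySem.Dict.modify, PySem.Dict.insert, PySem.Dict.getD, PySem.Dict.get?, PySem.Dict.contains]
      by_cases h2 : v = 2
      · subst h2; simp [genreStepA, h1, PySem.Dict.modify, PySem.Dict.insert, PySem.Dict.getD, PySem.Dict.get?, PySem.Dict.contains]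
      by_cases h3 : v = 3
      · subst h3; simp [genreStepA, h1, PySem.Dict.modify, PySem.Dict.insert, PySem.Dict.getD, PySem.Dict.get?, PySem.Dict.contains]
      by_cases h4 : v = 4
      · subst h4; simp [genreStepA, h1, PySem.Dict.modify, PySem.Dict.insert, PySem.Dict.getD, PySem.Dict.get?, PySem.Dict.contains]
      by_cases h5 : v = 5
      · subst h5; simp [genreStepA, h1, PySem.Dict.modify, PySem.Dict.insert, PySem.Dict.getD, PySem.Dict.get?, PySem.Dict.contains]
      by_cases h6 : v = 6
      · subst h6; simp [genreStepA, h1, PySem.Dict.modify, PySem.Dict.insert, PySem.Dict.getD, PySem.Dict.get?, PySem.Dict.contains]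
      by_cases h7 : v = 7
      · subst h7; simp [genreStepA, h1, PySem.Dict.modify, PySem.Dict.insert, PySem.Dict.getD, PySem.Dict.get?, PySem.Dict.contains]
      by_cases h8 : v = 8
      · subst h8; simp [genreStepA, h1, PySem.Dict.modify, PySem.Dict.insert, PySem.Dict.getD, PySem.Dict.get?, PySem.Dict.contains]
      by_cases h9 : v = 9
      · subst h9; simp [genreStepA, h1, PySem.Dict.modify, PySem.Dict.insert, PySem.Dict.getD, PySem.Dict.get?, PySem.Dict.contains]
      by_cases h10 : v = 10
      · subst h10; simp [genreStepA, h1, PySem.Dict.modify, PySem.Dict.insert, PySem.Dict.getD, PySem.Dict.get?, PySem.Dict.contains]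
      · simp [genreStepA, h1, h2, h3, h4, h5, h6, h7, h8, h9, h10]
    have cnt : ∀ (t c0 : Int), t + (if x = c0 then (1:Int) else 0) + (xs.count c0 : Int)
        = t + ((x::xs).count c0 : Int) := by
      intro t c0
      rcases eq_or_ne x c0 with hx | hx
      · subst hx; simp; omega
      · simp [hx]
    rw [step, ih]
    refine congrArg PySem.Dict.mk ?_
    simp only [cnt]

-- B in closed form: the ten per-genre scans in name order.
lemma genre_alt_closed (y : List Int) :
    genre_count_alt y =
      [("Rock", (y.count 1 : Int)), ("Country", y.count 2), ("Electronic", y.count 3),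
       ("Folk", y.count 4), ("Hip-Hop", y.count 5), ("Indie", y.count 6),
       ("Jazz", y.count 7), ("Metal", y.count 8), ("Pop", y.count 9), ("R&B", y.count 10)] := by
  unfold genre_count_alt
  simp [genreNames, PySem.List.enumerate, PySem.List.count, PySem.Dict.insert,
    PySem.Dict.contains, PySem.Dict.empty]

-- ===== VERDICT (by name: the statement is the Claim_ definition above) =====
theorem genre_count_spec : Claim_equal_genre_count := by
  intro y _
  show genre_count y = genre_count_alt y
  rw [genre_alt_closed]
  unfold genre_count
  simp only [PySem.List.len]
  rw [PySem.List.foldl_pyRange_pyGetD' y 0 genreStepA _ (le_refl 0)]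
  have hinit : (PySem.Dict.ofList
      [("Rock", 0), ("Country", 0), ("Electronic", 0), ("Folk", 0), ("Hip-Hop", 0),
       ("Indie", 0), ("Jazz", 0), ("Metal", 0), ("Pop", 0), ("R&B", 0)] : PySem.Dict String Int)
      = PySem.Dict.mk
      [("Rock", 0), ("Country", 0), ("Electronic", 0), ("Folk", 0), ("Hip-Hop", 0),
       ("Indie", 0), ("Jazz", 0), ("Metal", 0), ("Pop", 0), ("R&B", 0)] := by decide
  rw [hinit]
  rw [genre_foldA]
  simp
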